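-- pv_equiv track=rewrite | github.com/chyzhyk16/RLS_LAB2 | lab2.py | get_state_list
-- ===== SOURCE A (Python) =====
-- import itertools as it
--
-- INPUT_ARRAY = [
--     [0, 1, 1, 0, 0, 0, 0, 0],
--     [0, 0, 0, 1, 1, 0, 0, 0],
--     [0, 0, 0, 1, 0, 1, 0, 1],
--     [0, 0, 0, 0, 1, 1, 0, 1],
--     [0, 0, 0, 0, 0, 1, 1, 0],
--     [0, 0, 0, 0, 0, 0, 1, 1],
--     [0, 0, 0, 0, 0, 0, 0, 0],
--     [0, 0, 0, 0, 0, 0, 0, 0], ]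
--
-- def get_state_list(path_list):
--     working_states = []
--     all_states = [list(x) for x in it.product((0, 1), repeat=len(INPUT_ARRAY))]
--     for state in all_states:
--         for path in path_list:
--             count = 0
--             for n in path:
--                 if state[n] == 1:
--                     count += 1
--             if count == len(path):
--                 working_states.append(state)
--                 break
--     return working_states
-- ===== SOURCE B (Python) =====
-- def get_state_list(path_list):
--     # Constructive expansion: for each path, fix its bits and enumerate the free
--     # bits (MSB downward), collecting every qualifying state number in a set;
--     # the answer is the sorted set rendered back to bit lists.
--     n = 8  # len(INPUT_ARRAY)
--     keys = set()
--     for path in path_list: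
--         fixed = 0
--         for i in path:
--             fixed |= 1 << (n - 1 - (i % n))
--         states = [fixed]
--         for b in range(n - 1, -1, -1):
--             if not (fixed >> b) & 1:
--                 states = [k | e for k in states for e in (0, 1 << b)]
--         keys.update(states)
--     return [[(k >> (n - 1 - j)) & 1 for j in range(n)] for k in sorted(keys)]
-- ===== Notes on version B (the rewrite author's own statement) =====
-- stated objective: alternative
-- what changed: Instead of testing each of the 256 enumerated states against every path, B constructs the qualifying state numbers directly: per path it ORs the path's bits into a fixed mask, expands the remaining free bits (MSB downward) into every supermask, accumulates these in a set, and renders the sorted set back to bit lists.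
import Mathlib
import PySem

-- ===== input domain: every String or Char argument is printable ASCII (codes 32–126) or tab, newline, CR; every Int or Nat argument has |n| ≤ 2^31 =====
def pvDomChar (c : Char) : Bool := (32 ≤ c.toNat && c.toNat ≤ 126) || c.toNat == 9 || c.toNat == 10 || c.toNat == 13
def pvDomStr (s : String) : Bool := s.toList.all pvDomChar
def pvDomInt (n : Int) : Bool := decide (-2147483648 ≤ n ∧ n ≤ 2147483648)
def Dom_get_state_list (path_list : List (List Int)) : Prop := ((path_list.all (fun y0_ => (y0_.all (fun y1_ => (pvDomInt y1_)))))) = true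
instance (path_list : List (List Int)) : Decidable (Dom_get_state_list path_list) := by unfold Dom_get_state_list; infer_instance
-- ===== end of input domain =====

-- B builds the answer constructively: per path it fixes the path's bits and expands the
-- free bits into every qualifying state number, collects them in a set and sorts it —
-- no pass over all 2^8 candidate states (objective: alternative).

-- ===== PORT A =====
-- it.product((0, 1), repeat=n): leftmost component varies slowest
def pvAllStates : Nat → List (List Int)
  | 0 => [[]]
  | n + 1 => [(0 : Int), 1].flatMap (fun b => (pvAllStates n).map (fun s => b :: s))

-- the inner 'count' loop ('state[n]' is in range on Pre_)
def pvCountA (state : List Int) (path : List Int) : Int :=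
  path.foldl (fun c n => if PySem.List.pyGet? state n = some 1 then c + 1 else c) 0

-- the 'for path in path_list: … break' loop: true iff some path appends state
def pvScanPaths (state : List Int) : List (List Int) → Bool
  | [] => false
  | p :: rest => if pvCountA state p = (p.length : Int) then true else pvScanPaths state rest

def get_state_list (path_list : List (List Int)) : List (List Int) :=
  (pvAllStates 8).foldl
    (fun ws s => if pvScanPaths s path_list then ws ++ [s] else ws) []

-- ===== PORT B =====
-- fixed |= 1 << (n - 1 - (i % n))
def pvMask (path : List Int) : Nat :=
  path.foldl (fun m i => m ||| (1 <<< (8 - 1 - (PySem.Int.mod i 8).toNat))) 0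

-- for b in range(n-1,-1,-1): if not (fixed >> b) & 1: states = [k | e for k in states for e in (0, 1 << b)]
def pvExpand (fixed : Nat) : List Nat :=
  ((List.range 8).reverse).foldl
    (fun states b =>
      if ((fixed >>> b) &&& 1) == 1 then states
      else states.flatMap (fun k => [(0 : Nat), 1 <<< b].map (fun e => k ||| e)))
    [fixed]

-- [(k >> (n - 1 - j)) & 1 for j in range(n)]
def pvStateOf (k : Nat) : List Int :=
  (List.range 8).map (fun j => (((k >>> (8 - 1 - j)) &&& 1 : Nat) : Int))

def get_state_list_alt (path_list : List (List Int)) : List (List Int) :=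
  let keys := path_list.foldl
    (fun keys path => PySem.Set.update keys (pvExpand (pvMask path)))
    PySem.Set.empty
  (PySem.List.sorted keys (fun k => k) false).map pvStateOf

-- ===== PRECONDITION & SPEC =====
-- Pre_: every index in a path preceding the first empty path must be a valid
-- Python index into the 8-element state (otherwise A raises IndexError on
-- 'state[n]'); paths after an empty path are never reached, since the empty
-- path matches every state and breaks
def Pre_get_state_list (path_list : List (List Int)) : Prop :=
  ∀ p ∈ path_list.takeWhile (fun p => !p.isEmpty), ∀ i ∈ p, -8 ≤ i ∧ i < 8
instance (path_list : List (List Int)) : Decidable (Pre_get_state_list path_list) := by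
  unfold Pre_get_state_list; infer_instance
def pvWitness_get_state_list : List (List Int) := [[0, 1], [-1, 7]]

def Spec_get_state_list (path_list : List (List Int)) (out : List (List Int)) : Prop := out = get_state_list_alt path_list
instance (path_list : List (List Int)) (out : List (List Int)) : Decidable (Spec_get_state_list path_list out) := by unfold Spec_get_state_list; infer_instance

-- ===== CLAIM (what is proved, stated in full; the proofs are below) =====
def Claim_equal_get_state_list : Prop := ∀ (path_list : List (List Int)), Dom_get_state_list path_list → Pre_get_state_list path_list → Spec_get_state_list path_list (get_state_list path_list)

-- ===== LEMMAS AND PROOFS =====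

theorem pvCountA_eq_countP (s p : List Int) :
    pvCountA s p = (p.countP (fun n => PySem.List.pyGet? s n == some 1) : Int) := by
  suffices h : ∀ (c : Int), p.foldl (fun c n => if PySem.List.pyGet? s n = some 1 then c + 1 else c) c
      = c + (p.countP (fun n => PySem.List.pyGet? s n == some 1) : Int) by
    simpa [pvCountA] using h 0
  induction p with
  | nil => simp
  | cons n rest ih =>
      intro c
      by_cases h : PySem.List.pyGet? s n = some 1
      · simp [h, ih]
        ring
      · simp [h, ih]

theorem pvMask_testBit (p : List Int) (t : Nat) :
    (pvMask p).testBit t = p.any (fun i => 8 - 1 - (PySem.Int.mod i 8).toNat == t) := by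
  suffices h : ∀ (m0 : Nat),
      (p.foldl (fun m i => m ||| (1 <<< (8 - 1 - (PySem.Int.mod i 8).toNat))) m0).testBit t
      = (m0.testBit t || p.any (fun i => 8 - 1 - (PySem.Int.mod i 8).toNat == t)) by
    simpa [pvMask] using h 0
  induction p with
  | nil => simp
  | cons i rest ih =>
      intro m0
      rw [List.foldl_cons, ih]
      have hbe : ∀ (c : Nat), (c == t) = decide (c = t) := fun c => by
        by_cases h : c = t <;> simp [h]
      simp only [Nat.testBit_or, Nat.shiftLeft_eq, one_mul, Nat.testBit_two_pow,
        List.any_cons, Bool.or_assoc, hbe]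

theorem pvMask_lt (p : List Int) : pvMask p < 256 := by
  suffices h : ∀ (m0 : Nat), m0 < 2 ^ 8 →
      p.foldl (fun m i => m ||| (1 <<< (8 - 1 - (PySem.Int.mod i 8).toNat))) m0 < 2 ^ 8 by
    exact h 0 (by norm_num)
  induction p with
  | nil => intro m0 h; simpa using h
  | cons i rest ih =>
      intro m0 h
      rw [List.foldl_cons]
      apply ih
      have hle : 8 - 1 - (PySem.Int.mod i 8).toNat ≤ 7 := by omega
      have hb : (1 <<< (8 - 1 - (PySem.Int.mod i 8).toNat) : Nat) < 2 ^ 8 := by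
        have he : (1 <<< (8 - 1 - (PySem.Int.mod i 8).toNat) : Nat)
            = 2 ^ (8 - 1 - (PySem.Int.mod i 8).toNat) := by simp [Nat.shiftLeft_eq]
        rw [he]
        exact lt_of_le_of_lt (Nat.pow_le_pow_right (by norm_num) hle) (by norm_num)
      exact Nat.or_lt_two_pow h hb

theorem submask_iff (k m : Nat) : k &&& m = m ↔ ∀ t, m.testBit t = true → k.testBit t = true := by
  constructor
  · intro h t ht
    have h2 : (k &&& m).testBit t = m.testBit t := by rw [h]
    rw [Nat.testBit_and, ht, Bool.and_true] at h2
    exact h2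
  · intro h
    apply Nat.eq_of_testBit_eq
    intro t
    by_cases ht : m.testBit t <;> simp [Nat.testBit_and, ht, h t]

theorem pvStateOf_pyGet? (k : Nat) (i : Int) (h1 : -8 ≤ i) (h2 : i < 8) :
    PySem.List.pyGet? (pvStateOf k) i
      = some (((k >>> (8 - 1 - (PySem.Int.mod i 8).toNat)) &&& 1 : Nat) : Int) := by
  interval_cases i <;>
    simp [pvStateOf, PySem.List.pyGet?, PySem.List.pyIdx?, PySem.Int.mod, List.range_succ]

theorem bit_one_iff (k c : Nat) :
    ((((k >>> c) &&& 1 : Nat) : Int) = 1) ↔ k.testBit c = true := by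
  rw [Nat.testBit, Nat.shiftRight_eq_div_pow]
  rcases Nat.mod_two_eq_zero_or_one (k / 2 ^ c) with h2 | h2 <;>
    simp [Nat.and_one_is_mod, h2]

-- per-path: submask test = full-count test
theorem path_cond_eq (k : Nat) (p : List Int) (hp : ∀ i ∈ p, -8 ≤ i ∧ i < 8) :
    (k &&& pvMask p == pvMask p) = (pvCountA (pvStateOf k) p == (p.length : Int)) := by
  rw [Bool.eq_iff_iff]
  simp only [beq_iff_eq]
  rw [pvCountA_eq_countP, Nat.cast_inj, List.countP_eq_length, submask_iff]
  constructor
  · intro h i hi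
    have hb : k.testBit (8 - 1 - (PySem.Int.mod i 8).toNat) = true := by
      apply h
      rw [pvMask_testBit]
      exact List.any_eq_true.mpr ⟨i, hi, by simp⟩
    simp only [pvStateOf_pyGet? k i (hp i hi).1 (hp i hi).2, beq_iff_eq, Option.some.injEq]
    exact (bit_one_iff k _).mpr hb
  · intro h t ht
    rw [pvMask_testBit] at ht
    obtain ⟨i, hi, he⟩ := List.any_eq_true.mp ht
    have het : 8 - 1 - (PySem.Int.mod i 8).toNat = t := by simpa using he
    have hv := h i hi
    rw [pvStateOf_pyGet? k i (hp i hi).1 (hp i hi).2] at hv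
    simp only [beq_iff_eq, Option.some.injEq] at hv
    exact het ▸ (bit_one_iff k _).mp hv

theorem scan_eq_masks (k : Nat) (pl : List (List Int))
    (hpre : ∀ p ∈ pl.takeWhile (fun p => !p.isEmpty), ∀ i ∈ p, -8 ≤ i ∧ i < 8) :
    pvScanPaths (pvStateOf k) pl = (pl.map pvMask).any (fun m => k &&& m == m) := by
  induction pl with
  | nil => rfl
  | cons p rest ih =>
      by_cases hp : p = []
      · subst hp
        simp [pvScanPaths, pvCountA, pvMask]
      · have htw : (p :: rest).takeWhile (fun p => !p.isEmpty) = p :: rest.takeWhile (fun p => !p.isEmpty) := by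
          simp [hp]
        rw [htw] at hpre
        have hhead := path_cond_eq k p (fun i hi => hpre p (by simp) i hi)
        rw [List.map_cons, List.any_cons, hhead,
          ← ih (fun q hq => hpre q (by simp [hq]))]
        simp only [pvScanPaths]
        by_cases hc : pvCountA (pvStateOf k) p = (p.length : Int) <;> simp [hc]

theorem allStates_eq : pvAllStates 8 = (List.range 256).map pvStateOf := by
  set_option maxRecDepth 10000 in decide

-- the expansion of a fixed mask m < 256 is exactly the ordered list of its supermasks below 256
theorem expand_eq : ∀ m ∈ List.range 256,
    pvExpand m = (List.range 256).filter (fun k => k &&& m == m) := by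
  set_option maxRecDepth 20000 in decide

theorem mem_expand (m k : Nat) (hm : m < 256) :
    k ∈ pvExpand m ↔ k < 256 ∧ k &&& m = m := by
  rw [expand_eq m (List.mem_range.mpr hm)]
  simp [List.mem_filter, List.mem_range, and_comm]

-- the keys set accumulated across path_list: membership
theorem mem_keys_foldl (pl : List (List Int)) (s : List Nat) (k : Nat) :
    k ∈ pl.foldl (fun keys path => PySem.Set.update keys (pvExpand (pvMask path))) s
      ↔ k ∈ s ∨ ∃ p ∈ pl, k ∈ pvExpand (pvMask p) := by
  induction pl generalizing s with
  | nil => simp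
  | cons p rest ih =>
      rw [List.foldl_cons, ih, PySem.Set.mem_update]
      constructor
      · rintro (⟨h | h⟩ | ⟨q, hq, hk⟩)
        · exact Or.inl h
        · exact Or.inr ⟨p, by simp, h⟩
        · exact Or.inr ⟨q, by simp [hq], hk⟩
      · rintro (h | ⟨q, hq, hk⟩)
        · exact Or.inl (Or.inl h)
        · rcases List.mem_cons.mp hq with rfl | hq'
          · exact Or.inl (Or.inr hk)
          · exact Or.inr ⟨q, hq', hk⟩

theorem nodup_keys_foldl (pl : List (List Int)) (s : List Nat) (hs : s.Nodup) :
    (pl.foldl (fun keys path => PySem.Set.update keys (pvExpand (pvMask path))) s).Nodup := by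
  induction pl generalizing s with
  | nil => simpa using hs
  | cons p rest ih =>
      rw [List.foldl_cons]
      exact ih _ (PySem.Set.nodup_update s _ hs)

-- the accumulated key set, sorted, is exactly A's filtered state-number list
theorem keys_sorted_eq (pl : List (List Int))
    (hpre : ∀ p ∈ pl.takeWhile (fun p => !p.isEmpty), ∀ i ∈ p, -8 ≤ i ∧ i < 8) :
    PySem.List.sorted
      (pl.foldl (fun keys path => PySem.Set.update keys (pvExpand (pvMask path))) PySem.Set.empty)
      (fun k => k) false
    = (List.range 256).filter (fun k => pvScanPaths (pvStateOf k) pl) := by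
  have hfc : (List.range 256).filter (fun k => pvScanPaths (pvStateOf k) pl)
      = (List.range 256).filter (fun k => (pl.map pvMask).any (fun m => k &&& m == m)) := by
    apply List.filter_congr
    intro k _
    exact scan_eq_masks k pl hpre
  rw [hfc]
  set keys := pl.foldl (fun keys path => PySem.Set.update keys (pvExpand (pvMask path)))
    PySem.Set.empty with hkeys
  set F := (List.range 256).filter (fun k => (pl.map pvMask).any (fun m => k &&& m == m)) with hF
  have hmemF : ∀ k, k ∈ F ↔ k ∈ keys := by
    intro k
    rw [hF, List.mem_filter, List.mem_range, hkeys, mem_keys_foldl]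
    simp only [PySem.Set.empty, List.not_mem_nil, false_or, List.any_eq_true, List.mem_map]
    constructor
    · rintro ⟨hk, m, ⟨p, hp, rfl⟩, hsub⟩
      exact ⟨p, hp, (mem_expand _ k (pvMask_lt p)).mpr ⟨hk, by simpa using hsub⟩⟩
    · rintro ⟨p, hp, hk⟩
      obtain ⟨hlt, hsub⟩ := (mem_expand _ k (pvMask_lt p)).mp hk
      exact ⟨hlt, pvMask p, ⟨p, hp, rfl⟩, by simpa using hsub⟩
  have hnodupF : F.Nodup := (List.nodup_range).filter _
  have hnodupK : keys.Nodup := nodup_keys_foldl pl _ List.nodup_nil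
  have hperm : F.Perm keys := (List.perm_ext_iff_of_nodup hnodupF hnodupK).mpr hmemF
  have hpw : F.Pairwise (fun a b => (fun k => k) a < (fun k => k) b) :=
    List.Pairwise.filter _ (List.pairwise_lt_range)
  exact PySem.List.sorted_eq_of_perm_of_pairwise_lt _ _ _ hperm hpw

-- ===== VERDICT (by name: the statement is the Claim_ definition above) =====
theorem get_state_list_spec : Claim_equal_get_state_list := by
  intro pl _ hpre
  unfold Spec_get_state_list get_state_list get_state_list_alt
  rw [PySem.List.foldl_append_if_eq_filter, List.nil_append, allStates_eq, List.filter_map]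
  show List.map pvStateOf _
      = List.map pvStateOf (PySem.List.sorted
          (pl.foldl (fun keys path => PySem.Set.update keys (pvExpand (pvMask path))) PySem.Set.empty)
          (fun k => k) false)
  rw [keys_sorted_eq pl hpre]
  rfl
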